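-- pv_equiv track=rewrite | github.com/Thor-the-Dwarf/FI_Skilltrainer | QuizMaster/scripts/import_lf12fiae_quiz_to_db.py | collect_pool_topics
-- ===== SOURCE A (Python) =====
-- from typing import Any
--
-- def collect_pool_topics(
--     fallback_label: str,
--     questions: list[dict[str, Any]],
--     topic_titles: dict[str, str],
-- ) -> list[str]:
--     topics: list[str] = [fallback_label]
--     seen = {fallback_label}
--
--     for question in questions:
--         for progress_link in question.get("progress_links", []):
--             title = topic_titles.get(progress_link)
--             if not title or title in seen:
--                 continue
--             seen.add(title)
--             topics.append(title)
--
--     return topics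
-- ===== SOURCE B (Python) =====
-- def collect_pool_topics(
--     fallback_label,
--     questions,
--     topic_titles,
-- ):
--     cands = [topic_titles.get(pl)
--              for q in questions
--              for pl in q.get("progress_links", [])]
--
--     def firsts(prefix, rest):
--         if not rest:
--             return []
--         t = rest[0]
--         keep = [t] if (t and t != fallback_label and t not in prefix) else []
--         return keep + firsts(prefix + [t], rest[1:])
--
--     return [fallback_label] + firsts([], cands)
-- ===== Notes on version B (the rewrite author's own statement) =====
-- stated objective: alternative
-- what changed: Drops A's seen-set single pass: B first flattens all candidate titles, then deduplicates by a recursive scan that keeps a candidate only if it does not occur in the raw prefix already scanned (no set, no dict), prepending the fallback label.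
import Mathlib
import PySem

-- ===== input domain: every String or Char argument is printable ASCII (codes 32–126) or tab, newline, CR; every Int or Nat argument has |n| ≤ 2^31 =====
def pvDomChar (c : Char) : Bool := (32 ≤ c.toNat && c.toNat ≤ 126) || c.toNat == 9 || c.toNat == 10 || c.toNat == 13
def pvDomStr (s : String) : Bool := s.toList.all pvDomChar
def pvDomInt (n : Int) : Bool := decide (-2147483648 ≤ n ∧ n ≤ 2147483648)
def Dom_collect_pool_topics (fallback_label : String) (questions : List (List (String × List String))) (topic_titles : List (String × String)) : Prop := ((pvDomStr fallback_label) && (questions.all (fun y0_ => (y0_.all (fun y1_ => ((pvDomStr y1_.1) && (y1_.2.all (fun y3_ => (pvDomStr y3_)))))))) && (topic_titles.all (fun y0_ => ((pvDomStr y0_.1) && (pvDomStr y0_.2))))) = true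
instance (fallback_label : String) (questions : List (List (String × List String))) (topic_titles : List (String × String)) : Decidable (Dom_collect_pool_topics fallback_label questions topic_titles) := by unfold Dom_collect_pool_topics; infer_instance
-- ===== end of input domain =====

-- B drops A's seen-set single pass for a collect-then-dedup shape: flatten all
-- candidate titles, then a recursive scan keeps a candidate iff it is absent from
-- the raw prefix already scanned; objective: alternative (no set, no dict).

-- ===== PORT A =====
-- literal transliteration of A: state (topics, seen), seen a Python set
def collect_pool_topics (fallback_label : String) (questions : List (List (String × List String))) (topic_titles : List (String × String)) : List String :=
  (questions.foldl
    (fun st question =>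
      (PySem.Dict.getD (PySem.Dict.ofList question) "progress_links" []).foldl
        (fun st progress_link =>
          match PySem.Dict.get? (PySem.Dict.ofList topic_titles) progress_link with
          | none => st  -- title is None: falsy, continue
          | some title =>
            if title = "" ∨ PySem.Set.contains st.2 title then st
            else (st.1 ++ [title], PySem.Set.add st.2 title))
        st)
    ([fallback_label], PySem.Set.ofList [fallback_label])).1

-- ===== PORT B =====
-- B's recursive helper firsts(prefix, rest): keep rest[0] iff truthy, ≠ fallback
-- and not in the raw prefix (Python 't not in prefix' compares the string t against
-- Optional entries: None never equals a string, so it is 'some t ∈ prefixList')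
def pvFirsts (fallback_label : String) (prefixList rest : List (Option String)) : List String :=
  match rest with
  | [] => []
  | t? :: r =>
    (match t? with
     | some t => if t ≠ "" ∧ t ≠ fallback_label ∧ some t ∉ prefixList then [t] else []
     | none => []) ++ pvFirsts fallback_label (prefixList ++ [t?]) r

-- literal transliteration of B: flattened comprehension of candidates, then firsts
def collect_pool_topics_alt (fallback_label : String) (questions : List (List (String × List String))) (topic_titles : List (String × String)) : List String :=
  let cands : List (Option String) :=
    questions.flatMap (fun q =>
      (PySem.Dict.getD (PySem.Dict.ofList q) "progress_links" []).map
        (fun pl => PySem.Dict.get? (PySem.Dict.ofList topic_titles) pl))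
  [fallback_label] ++ pvFirsts fallback_label [] cands

-- ===== PRECONDITION & SPEC =====
def Spec_collect_pool_topics (fallback_label : String) (questions : List (List (String × List String))) (topic_titles : List (String × String)) (out : List String) : Prop := out = collect_pool_topics_alt fallback_label questions topic_titles
instance (fallback_label : String) (questions : List (List (String × List String))) (topic_titles : List (String × String)) (out : List String) : Decidable (Spec_collect_pool_topics fallback_label questions topic_titles out) := by unfold Spec_collect_pool_topics; infer_instance

-- ===== CLAIM (what is proved, stated in full; the proofs are below) =====
def Claim_equal_collect_pool_topics : Prop := ∀ (fallback_label : String) (questions : List (List (String × List String))) (topic_titles : List (String × String)), Dom_collect_pool_topics fallback_label questions topic_titles → Spec_collect_pool_topics fallback_label questions topic_titles (collect_pool_topics fallback_label questions topic_titles)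

-- ===== LEMMAS AND PROOFS =====

-- single-set version of A's loop body, acting on one candidate Option String
def pvStepS (s : PySem.Set String) (o : Option String) : PySem.Set String :=
  match o with
  | none => s
  | some t => if t = "" then s else PySem.Set.add s t

-- A's pair state stays diagonal: both components are the seen set and move by pvStepS
theorem pv_pair_fold (opts : List (Option String)) (s : PySem.Set String) :
    opts.foldl
      (fun st o =>
        match o with
        | none => st
        | some title =>
          if title = "" ∨ PySem.Set.contains st.2 title then st
          else (st.1 ++ [title], PySem.Set.add st.2 title))
      (s, s)
    = (opts.foldl pvStepS s, opts.foldl pvStepS s) := by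
  induction opts generalizing s with
  | nil => rfl
  | cons o rest ih =>
    cases o with
    | none => simpa [pvStepS] using ih s
    | some t =>
      by_cases h0 : t = ""
      · simpa [pvStepS, h0] using ih s
      · by_cases hc : t ∈ s
        · simpa [pvStepS, h0, hc, PySem.Set.add] using ih s
        · simpa [pvStepS, h0, hc, PySem.Set.add] using ih (s ++ [t])

-- lifting pv_pair_fold through the outer loop over questions
theorem pv_outer {A B : Type} (L : A → List B) (f : B → Option String)
    (qs : List A) (s : PySem.Set String) :
    qs.foldl
      (fun st q =>
        (L q).foldl
          (fun st pl =>
            match f pl with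
            | none => st
            | some title =>
              if title = "" ∨ PySem.Set.contains st.2 title then st
              else (st.1 ++ [title], PySem.Set.add st.2 title))
          st)
      (s, s)
    = (qs.foldl (fun s q => ((L q).map f).foldl pvStepS s) s,
       qs.foldl (fun s q => ((L q).map f).foldl pvStepS s) s) := by
  induction qs generalizing s with
  | nil => rfl
  | cons q rest ih =>
    simp only [List.foldl_cons]
    have h1 : (L q).foldl
        (fun st pl =>
          match f pl with
          | none => st
          | some title =>
            if title = "" ∨ PySem.Set.contains st.2 title then st
            else (st.1 ++ [title], PySem.Set.add st.2 title)) (s, s)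
      = ((L q).map f).foldl
        (fun st o =>
          match o with
          | none => st
          | some title =>
            if title = "" ∨ PySem.Set.contains st.2 title then st
            else (st.1 ++ [title], PySem.Set.add st.2 title)) (s, s) := by
      rw [List.foldl_map]
    rw [h1, pv_pair_fold, ih]

-- core invariant: if the seen list s holds exactly fallback plus the truthy titles
-- of the already-scanned prefix, then A's fold appends exactly B's firsts
theorem pv_fold_firsts (fb : String) (opts : List (Option String)) :
    ∀ (pre : List (Option String)) (s : List String),
      (∀ x, x ∈ s ↔ (x = fb ∨ (some x ∈ pre ∧ x ≠ ""))) →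
      opts.foldl pvStepS s = s ++ pvFirsts fb pre opts := by
  induction opts with
  | nil => intro pre s _; simp [pvFirsts]
  | cons o rest ih =>
    intro pre s hs
    cases o with
    | none =>
      have h := ih (pre ++ [none]) s (by
        intro x; rw [hs x]; simp)
      simp only [List.foldl_cons, pvStepS, pvFirsts]
      simpa using h
    | some t =>
      by_cases h0 : t = ""
      · subst h0
        have h := ih (pre ++ [some ""]) s (by
          intro x; rw [hs x]
          constructor
          · rintro (h | ⟨h1, h2⟩); · exact Or.inl h
            exact Or.inr ⟨by simp [h1], h2⟩
          · rintro (h | ⟨h1, h2⟩); · exact Or.inl h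
            rcases List.mem_append.1 h1 with h1 | h1
            · exact Or.inr ⟨h1, h2⟩
            · simp at h1; exact absurd h1 h2)
        simp only [List.foldl_cons, pvStepS, pvFirsts]
        simpa using h
      · by_cases hc : t ∈ s
        · -- already seen: t = fb or some t ∈ pre, so B skips it too
          have hcond : ¬ (t ≠ "" ∧ t ≠ fb ∧ some t ∉ pre) := by
            rcases (hs t).1 hc with h | ⟨h1, _⟩
            · intro ⟨_, h2, _⟩; exact h2 h
            · intro ⟨_, _, h3⟩; exact h3 h1
          have h := ih (pre ++ [some t]) s (by
            intro x
            constructor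
            · intro hx
              rcases (hs x).1 hx with h | ⟨h1, h2⟩
              · exact Or.inl h
              · exact Or.inr ⟨List.mem_append_left _ h1, h2⟩
            · rintro (h | ⟨h1, h2⟩)
              · exact (hs x).2 (Or.inl h)
              · rcases List.mem_append.1 h1 with h1 | h1
                · exact (hs x).2 (Or.inr ⟨h1, h2⟩)
                · simp at h1; subst h1; exact hc)
          simp only [List.foldl_cons, pvStepS, pvFirsts, h0]
          simp [PySem.Set.add, hc, hcond]
          simpa using h
        · -- new title: A appends it, B keeps it
          have hfb : t ≠ fb := fun h => hc ((hs t).2 (Or.inl h))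
          have hpre : some t ∉ pre := fun h => hc ((hs t).2 (Or.inr ⟨h, h0⟩))
          have h := ih (pre ++ [some t]) (s ++ [t]) (by
            intro x
            simp only [List.mem_append, List.mem_singleton, hs x]
            constructor
            · rintro ((h | ⟨h1, h2⟩) | h)
              · exact Or.inl h
              · exact Or.inr ⟨Or.inl h1, h2⟩
              · subst h; exact Or.inr ⟨Or.inr rfl, h0⟩
            · rintro (h | ⟨h1 | h1, h2⟩)
              · exact Or.inl (Or.inl h)
              · exact Or.inl (Or.inr ⟨h1, h2⟩)
              · simp at h1; subst h1; exact Or.inr rfl)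
          simp only [List.foldl_cons, pvStepS, pvFirsts, h0]
          simp [PySem.Set.add, hc, h0, hfb, hpre]
          simpa using h

-- ===== VERDICT (by name: the statement is the Claim_ definition above) =====
theorem collect_pool_topics_spec : Claim_equal_collect_pool_topics := by
  intro fb qs tt _
  unfold Spec_collect_pool_topics collect_pool_topics collect_pool_topics_alt
  have hself : (PySem.Set.ofList [fb] : List String) = [fb] := by
    simp [PySem.Set.ofList, PySem.Set.add, PySem.Set.empty]
  have hinit : (([fb] : List String), PySem.Set.ofList [fb])
      = (PySem.Set.ofList [fb], PySem.Set.ofList [fb]) := by rw [hself]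
  dsimp only
  rw [hinit,
    pv_outer (fun q => PySem.Dict.getD (PySem.Dict.ofList q) "progress_links" [])
      (fun pl => PySem.Dict.get? (PySem.Dict.ofList tt) pl) qs (PySem.Set.ofList [fb]),
    ← List.foldl_flatMap, hself,
    pv_fold_firsts fb _ [] [fb] (by intro x; simp)]
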